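-- pv_equiv track=rewrite | github.com/WindChimeRan/mining_DSRE_NYT | src/data_stats.py | reverse_entity_relation
-- ===== SOURCE A (Python) =====
-- import typing
-- from typing import Tuple, List, Dict, Set, Generator, Any
--
-- def reverse_entity_relation(out_pass2_stats: Dict[str, Dict[str, typing.Counter[str]]]) -> Dict[str, Dict[str, int]]:
--     reverse_rel: Dict[str, Dict[str, int]] = {}
--
--     for r in out_pass2_stats:
--         head = out_pass2_stats[r]['head'].keys()
--         tail = out_pass2_stats[r]['tail'].keys()
--         for h in head:
--             reverse_rel.setdefault(h, {'head': 0, 'tail': 0})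
--             reverse_rel[h]['head'] += 1
--         for t in tail:
--             reverse_rel.setdefault(t, {'head': 0, 'tail': 0})
--             reverse_rel[t]['tail'] += 1
--     return reverse_rel
-- ===== SOURCE B (Python) =====
-- def reverse_entity_relation(out_pass2_stats):
--     # B: flatten the head/tail key streams, tally each in one global pass,
--     # then assemble the result in one merge pass over first occurrences.
--     rels = list(out_pass2_stats.values())
--     heads = [h for rel in rels for h in rel['head']]
--     tails = [t for rel in rels for t in rel['tail']]
--     head_c = {}
--     for h in heads:
--         head_c[h] = head_c.get(h, 0) + 1
--     tail_c = {}
--     for t in tails: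
--         tail_c[t] = tail_c.get(t, 0) + 1
--     order = [e for rel in rels for e in [*rel['head'], *rel['tail']]]
--     return {e: {'head': head_c.get(e, 0), 'tail': tail_c.get(e, 0)}
--             for e in dict.fromkeys(order)}
-- ===== Notes on version B (the rewrite author's own statement) =====
-- stated objective: alternative
-- what changed: A interleaves setdefault-and-increment per entity inside one fused loop over relations; B separates concerns: it flattens the head and tail key streams, builds two global tallies in independent passes, and assembles the result dict in a single merge pass over the deduplicated occurrence stream.
import Mathlib
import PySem

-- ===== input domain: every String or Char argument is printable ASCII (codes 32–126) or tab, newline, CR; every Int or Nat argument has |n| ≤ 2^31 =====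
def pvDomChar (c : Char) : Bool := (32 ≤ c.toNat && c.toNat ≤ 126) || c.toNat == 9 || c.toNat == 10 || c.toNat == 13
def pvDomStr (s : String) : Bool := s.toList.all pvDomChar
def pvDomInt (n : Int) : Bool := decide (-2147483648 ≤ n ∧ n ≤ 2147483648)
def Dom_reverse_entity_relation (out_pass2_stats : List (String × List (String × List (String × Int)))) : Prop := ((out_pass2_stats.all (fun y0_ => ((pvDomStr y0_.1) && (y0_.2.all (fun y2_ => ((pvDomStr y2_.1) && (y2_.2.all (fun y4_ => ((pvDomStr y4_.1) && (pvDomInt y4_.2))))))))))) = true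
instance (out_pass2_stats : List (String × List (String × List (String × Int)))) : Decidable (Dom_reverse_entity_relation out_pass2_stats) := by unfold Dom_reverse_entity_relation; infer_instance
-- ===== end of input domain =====

-- B separates A's fused setdefault/increment loop into flattened key streams, two global tallies and one merge pass (alternative decomposition, same cost).


-- ===== PORT A =====
-- shared accessors: out_pass2_stats[r]['head'].keys() / ['tail'].keys() (exact under Pre_, which
-- guarantees the keys exist and the association lists carry no duplicate keys)
def pvHeadKeys (rel : List (String × List (String × Int))) : List String :=
  ((PySem.Dict.mk rel).getD "head" []).map (fun q => q.1)
def pvTailKeys (rel : List (String × List (String × Int))) : List String :=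
  ((PySem.Dict.mk rel).getD "tail" []).map (fun q => q.1)
-- the literal {'head': 0, 'tail': 0}
def pvZeroRec : PySem.Dict String Int := PySem.Dict.mk [("head", 0), ("tail", 0)]
-- A's loop body: reverse_rel.setdefault(e, {'head': 0, 'tail': 0}); reverse_rel[e][key] += 1
def pvBump (rr : PySem.Dict String (PySem.Dict String Int)) (e : String) (key : String) :
    PySem.Dict String (PySem.Dict String Int) :=
  let rr := rr.setdefault e pvZeroRec
  rr.insert e ((rr.getD e PySem.Dict.empty).insert key ((rr.getD e PySem.Dict.empty).getD key 0 + 1))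

def reverse_entity_relation (out_pass2_stats : List (String × List (String × List (String × Int)))) : List (String × List (String × Int)) :=
  let rr := out_pass2_stats.foldl (fun rr rp =>
      let head := pvHeadKeys rp.2
      let tail := pvTailKeys rp.2
      let rr2 := head.foldl (fun rr h => pvBump rr h "head") rr
      tail.foldl (fun rr t => pvBump rr t "tail") rr2)
    PySem.Dict.empty
  rr.items.map (fun p => (p.1, p.2.items))

-- ===== PORT B =====
def reverse_entity_relation_alt (out_pass2_stats : List (String × List (String × List (String × Int)))) : List (String × List (String × Int)) :=
  let rels := out_pass2_stats.map (fun p => p.2)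
  let heads := rels.flatMap pvHeadKeys
  let tails := rels.flatMap pvTailKeys
  let head_c := heads.foldl (fun d h => d.insert h (d.getD h 0 + 1)) PySem.Dict.empty
  let tail_c := tails.foldl (fun d t => d.insert t (d.getD t 0 + 1)) PySem.Dict.empty
  let order := rels.flatMap (fun rel => pvHeadKeys rel ++ pvTailKeys rel)
  (PySem.List.dedup order).map (fun e => (e, [("head", head_c.getD e 0), ("tail", tail_c.getD e 0)]))

-- ===== PRECONDITION & SPEC =====
-- Pre_ excludes (a) inputs where some relation lacks a 'head' or 'tail' key — Python A raises KeyError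
-- there — and (b) association lists with duplicate keys at any level, which do not represent a Python
-- dict unambiguously (Python collapses them before A runs, keeping the last value).
def Pre_reverse_entity_relation (out_pass2_stats : List (String × List (String × List (String × Int)))) : Prop :=
  (out_pass2_stats.map (fun p => p.1)).Nodup ∧
  ∀ p ∈ out_pass2_stats,
    (p.2.map (fun q => q.1)).Nodup ∧
    "head" ∈ p.2.map (fun q => q.1) ∧
    "tail" ∈ p.2.map (fun q => q.1) ∧
    ∀ q ∈ p.2, (q.2.map (fun c => c.1)).Nodup
instance (out_pass2_stats : List (String × List (String × List (String × Int)))) : Decidable (Pre_reverse_entity_relation out_pass2_stats) := by unfold Pre_reverse_entity_relation; infer_instance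

def pvWitness_reverse_entity_relation : (List (String × List (String × List (String × Int)))) :=
  [("r1", [("head", [("e1", 2)]), ("tail", [("e2", 1)])]),
   ("r2", [("head", [("e2", 1)]), ("tail", [])])]

def Spec_reverse_entity_relation (out_pass2_stats : List (String × List (String × List (String × Int)))) (out : List (String × List (String × Int))) : Prop := out = reverse_entity_relation_alt out_pass2_stats
instance (out_pass2_stats : List (String × List (String × List (String × Int)))) (out : List (String × List (String × Int))) : Decidable (Spec_reverse_entity_relation out_pass2_stats out) := by unfold Spec_reverse_entity_relation; infer_instance

-- ===== CLAIM (what is proved, stated in full; the proofs are below) =====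
def Claim_equal_reverse_entity_relation : Prop := ∀ (out_pass2_stats : List (String × List (String × List (String × Int)))), Dom_reverse_entity_relation out_pass2_stats → Pre_reverse_entity_relation out_pass2_stats → Spec_reverse_entity_relation out_pass2_stats (reverse_entity_relation out_pass2_stats)

-- ===== LEMMAS AND PROOFS =====

-- event stream: one (entity, isHead) record per key occurrence, in A's processing order
def pvEvs (s : List (String × List (String × List (String × Int)))) : List (String × Bool) :=
  s.flatMap (fun rp => (pvHeadKeys rp.2).map (fun h => (h, true)) ++ (pvTailKeys rp.2).map (fun t => (t, false)))

def pvStep (rr : PySem.Dict String (PySem.Dict String Int)) (ev : String × Bool) :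
    PySem.Dict String (PySem.Dict String Int) :=
  pvBump rr ev.1 (if ev.2 then "head" else "tail")

def pvCnt (e : String) (b : Bool) (E : List (String × Bool)) : Int := (E.count (e, b) : Int)

def pvRow (E : List (String × Bool)) (e : String) : PySem.Dict String Int :=
  PySem.Dict.mk [("head", pvCnt e true E), ("tail", pvCnt e false E)]

-- A's nested fold is the flat fold of pvStep over the event stream
lemma pvA_flat (s : List (String × List (String × List (String × Int))))
    (rr : PySem.Dict String (PySem.Dict String Int)) :
    s.foldl (fun rr rp =>
      let head := pvHeadKeys rp.2
      let tail := pvTailKeys rp.2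
      let rr2 := head.foldl (fun rr h => pvBump rr h "head") rr
      tail.foldl (fun rr t => pvBump rr t "tail") rr2) rr
    = (pvEvs s).foldl pvStep rr := by
  induction s generalizing rr with
  | nil => rfl
  | cons rp s ih =>
    simp only [List.foldl_cons, pvEvs, List.flatMap_cons, List.foldl_append, List.foldl_map]
    rw [← pvEvs, ih]
    have hh : (fun (x : PySem.Dict String (PySem.Dict String Int)) (y : String) => pvStep x (y, true))
        = fun x y => pvBump x y "head" := by funext x y; simp [pvStep]
    have ht : (fun (x : PySem.Dict String (PySem.Dict String Int)) (y : String) => pvStep x (y, false))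
        = fun x y => pvBump x y "tail" := by funext x y; simp [pvStep]
    rw [hh, ht]

lemma pvCnt_snoc (x e : String) (b' b : Bool) (E : List (String × Bool)) :
    pvCnt x b' (E ++ [(e, b)]) = pvCnt x b' E + (if x = e ∧ b' = b then 1 else 0) := by
  unfold pvCnt
  rw [List.count_append]
  push_cast
  congr 1
  by_cases h : x = e ∧ b' = b
  · obtain ⟨rfl, rfl⟩ := h; simp
  · have hne : ((e, b) == (x, b')) = false := by
      simp only [beq_eq_false_iff_ne, ne_eq, Prod.mk.injEq]
      tauto
    simp [List.count_singleton, hne, h]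

lemma pvRow_snoc_ne (x e : String) (b : Bool) (E : List (String × Bool)) (hne : x ≠ e) :
    pvRow (E ++ [(e, b)]) x = pvRow E x := by
  unfold pvRow
  rw [pvCnt_snoc, pvCnt_snoc]
  simp [hne]

lemma pvRow_snoc_self_ins (e : String) (b : Bool) (E : List (String × Bool)) :
    (pvRow E e).insert (if b then "head" else "tail")
      ((pvRow E e).getD (if b then "head" else "tail") 0 + 1)
    = pvRow (E ++ [(e, b)]) e := by
  cases b with
  | false =>
    have h1 : pvCnt e true (E ++ [(e, false)]) = pvCnt e true E := by rw [pvCnt_snoc]; simp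
    have h2 : pvCnt e false (E ++ [(e, false)]) = pvCnt e false E + 1 := by rw [pvCnt_snoc]; simp
    show (pvRow E e).insert "tail" ((pvRow E e).getD "tail" 0 + 1) = pvRow (E ++ [(e, false)]) e
    unfold pvRow
    rw [h1, h2]
    rfl
  | true =>
    have h1 : pvCnt e true (E ++ [(e, true)]) = pvCnt e true E + 1 := by rw [pvCnt_snoc]; simp
    have h2 : pvCnt e false (E ++ [(e, true)]) = pvCnt e false E := by rw [pvCnt_snoc]; simp
    show (pvRow E e).insert "head" ((pvRow E e).getD "head" 0 + 1) = pvRow (E ++ [(e, true)]) e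
    unfold pvRow
    rw [h1, h2]
    rfl

lemma pvRow_zero (e : String) (E : List (String × Bool)) (he : e ∉ E.map Prod.fst) (b : Bool) :
    pvZeroRec.insert (if b then "head" else "tail")
      (pvZeroRec.getD (if b then "head" else "tail") 0 + 1)
    = pvRow (E ++ [(e, b)]) e := by
  have hz : ∀ b', pvCnt e b' E = 0 := by
    intro b'
    unfold pvCnt
    rw [List.count_eq_zero.mpr (fun hm => he (List.mem_map_of_mem hm))]
    rfl
  cases b with
  | false =>
    have h1 : pvCnt e true (E ++ [(e, false)]) = 0 := by rw [pvCnt_snoc]; simp [hz]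
    have h2 : pvCnt e false (E ++ [(e, false)]) = 1 := by rw [pvCnt_snoc]; simp [hz]
    show pvZeroRec.insert "tail" (pvZeroRec.getD "tail" 0 + 1) = pvRow (E ++ [(e, false)]) e
    unfold pvRow
    rw [h1, h2]
    decide
  | true =>
    have h1 : pvCnt e true (E ++ [(e, true)]) = 1 := by rw [pvCnt_snoc]; simp [hz]
    have h2 : pvCnt e false (E ++ [(e, true)]) = 0 := by rw [pvCnt_snoc]; simp [hz]
    show pvZeroRec.insert "head" (pvZeroRec.getD "head" 0 + 1) = pvRow (E ++ [(e, true)]) e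
    unfold pvRow
    rw [h1, h2]
    decide

-- the main invariant: the fold's items are the deduplicated entities, each paired with its counts
lemma pvMain (E : List (String × Bool)) :
    (E.foldl pvStep PySem.Dict.empty).items
      = (PySem.List.dedup (E.map Prod.fst)).map (fun x => (x, pvRow E x)) := by
  induction E using List.reverseRecOn with
  | nil => rfl
  | append_singleton E ev ih =>
    obtain ⟨e, b⟩ := ev
    rw [List.foldl_append, List.foldl_cons, List.foldl_nil]
    have hD : E.foldl pvStep PySem.Dict.empty
        = PySem.Dict.mk ((PySem.List.dedup (E.map Prod.fst)).map (fun x => (x, pvRow E x))) :=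
      PySem.Dict.ext ih
    rw [hD]
    have hmap : (E ++ [(e, b)]).map Prod.fst = E.map Prod.fst ++ [e] := by simp
    rw [hmap]
    have hndL : (PySem.List.dedup (E.map Prod.fst)).Nodup := PySem.List.nodup_dedup _
    have hkeysM : (PySem.Dict.mk ((PySem.List.dedup (E.map Prod.fst)).map (fun x => (x, pvRow E x)))).keys
        = PySem.List.dedup (E.map Prod.fst) := by
      rw [PySem.Dict.keys_mk, List.map_map]
      simp [Function.comp_def]
    by_cases he : e ∈ E.map Prod.fst
    · -- the entity is already a key: setdefault is a no-op, insert overwrites in place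
      have heL : e ∈ PySem.List.dedup (E.map Prod.fst) := (PySem.List.mem_dedup _ _).mpr he
      have hded : PySem.List.dedup (E.map Prod.fst ++ [e]) = PySem.List.dedup (E.map Prod.fst) := by
        rw [PySem.List.dedup_eq_ofList, PySem.Set.ofList_append_singleton, ← PySem.List.dedup_eq_ofList]
        unfold PySem.Set.add
        rw [if_pos]
        unfold PySem.Set.contains
        simpa using heL
      have hcont : (PySem.Dict.mk ((PySem.List.dedup (E.map Prod.fst)).map (fun x => (x, pvRow E x)))).contains e = true := by
        rw [PySem.Dict.contains_eq_decide_mem_keys, hkeysM]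
        simpa using heL
      have hmem : (e, pvRow E e) ∈ (PySem.List.dedup (E.map Prod.fst)).map (fun x => (x, pvRow E x)) :=
        List.mem_map_of_mem heL
      have hget : (PySem.Dict.mk ((PySem.List.dedup (E.map Prod.fst)).map (fun x => (x, pvRow E x)))).getD e PySem.Dict.empty
          = pvRow E e := by
        unfold PySem.Dict.getD
        rw [PySem.Dict.get?_of_mem_items _ hmem (by rw [hkeysM]; exact hndL)]
        rfl
      simp only [pvStep, pvBump]
      rw [PySem.Dict.setdefault_of_contains _ _ hcont, hget, pvRow_snoc_self_ins,
        PySem.Dict.items_insert_of_contains _ _ hcont, hded, List.map_map]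
      refine List.map_congr_left (fun x hx => ?_)
      by_cases hxe : x = e
      · subst hxe
        simp
      · have hb : (x == e) = false := by simp [hxe]
        simp [Function.comp, hb, pvRow_snoc_ne x e b E hxe]
    · -- fresh entity: setdefault appends the zero record, insert then overwrites it
      have heL : e ∉ PySem.List.dedup (E.map Prod.fst) := fun h => he ((PySem.List.mem_dedup _ _).mp h)
      have hded : PySem.List.dedup (E.map Prod.fst ++ [e])
          = PySem.List.dedup (E.map Prod.fst) ++ [e] := by
        rw [PySem.List.dedup_eq_ofList, PySem.Set.ofList_append_singleton, ← PySem.List.dedup_eq_ofList]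
        unfold PySem.Set.add
        rw [if_neg]
        unfold PySem.Set.contains
        simpa using heL
      have hcont : (PySem.Dict.mk ((PySem.List.dedup (E.map Prod.fst)).map (fun x => (x, pvRow E x)))).contains e = false := by
        rw [PySem.Dict.contains_eq_decide_mem_keys, hkeysM]
        simpa using heL
      simp only [pvStep, pvBump]
      rw [PySem.Dict.setdefault_of_not_contains _ _ hcont]
      have hins : (PySem.Dict.mk ((PySem.List.dedup (E.map Prod.fst)).map (fun x => (x, pvRow E x)))).insert e pvZeroRec
          = PySem.Dict.mk ((PySem.List.dedup (E.map Prod.fst)).map (fun x => (x, pvRow E x)) ++ [(e, pvZeroRec)]) :=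
        PySem.Dict.ext (PySem.Dict.items_insert_of_not_contains _ _ hcont)
      rw [hins]
      have hkeys' : (PySem.Dict.mk ((PySem.List.dedup (E.map Prod.fst)).map (fun x => (x, pvRow E x)) ++ [(e, pvZeroRec)])).keys
          = PySem.List.dedup (E.map Prod.fst) ++ [e] := by
        rw [PySem.Dict.keys_mk, List.map_append, List.map_map]
        simp [Function.comp_def]
      have hnd' : (PySem.List.dedup (E.map Prod.fst) ++ [e]).Nodup := by
        rw [List.nodup_append]
        refine ⟨hndL, List.nodup_singleton _, fun a ha x hx => ?_⟩
        rw [List.mem_singleton] at hx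
        subst hx
        exact fun h => heL (h ▸ ha)
      have hmem : (e, pvZeroRec) ∈ (PySem.List.dedup (E.map Prod.fst)).map (fun x => (x, pvRow E x)) ++ [(e, pvZeroRec)] :=
        List.mem_append_right _ (List.mem_singleton_self _)
      have hget : (PySem.Dict.mk ((PySem.List.dedup (E.map Prod.fst)).map (fun x => (x, pvRow E x)) ++ [(e, pvZeroRec)])).getD e PySem.Dict.empty
          = pvZeroRec := by
        unfold PySem.Dict.getD
        rw [PySem.Dict.get?_of_mem_items _ hmem (by rw [hkeys']; exact hnd')]
        rfl
      have hcont' : (PySem.Dict.mk ((PySem.List.dedup (E.map Prod.fst)).map (fun x => (x, pvRow E x)) ++ [(e, pvZeroRec)])).contains e = true := by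
        rw [PySem.Dict.contains_eq_decide_mem_keys, hkeys']
        simp
      rw [hget, pvRow_zero e E he b, PySem.Dict.items_insert_of_contains _ _ hcont', hded,
        List.map_append, List.map_append, List.map_map]
      congr 1
      · refine List.map_congr_left (fun x hx => ?_)
        have hxe : x ≠ e := fun h => heL (h ▸ hx)
        have hb : (x == e) = false := by simp [hxe]
        simp [Function.comp, hb, pvRow_snoc_ne x e b E hxe]
      · simp

-- B's occurrence stream is the event stream's entity column
lemma pvOrder (s : List (String × List (String × List (String × Int)))) :
    (s.map (fun p => p.2)).flatMap (fun rel => pvHeadKeys rel ++ pvTailKeys rel)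
      = (pvEvs s).map Prod.fst := by
  induction s with
  | nil => rfl
  | cons rp s ih =>
    simp only [List.map_cons, List.flatMap_cons, pvEvs, List.map_append, List.map_map]
    rw [← pvEvs, ih]
    simp [Function.comp_def]

lemma pvHeadsCount (s : List (String × List (String × List (String × Int)))) (e : String) :
    ((s.map (fun p => p.2)).flatMap pvHeadKeys).count e = (pvEvs s).count (e, true) := by
  induction s with
  | nil => rfl
  | cons rp s ih =>
    simp only [List.map_cons, List.flatMap_cons, pvEvs, List.count_append]
    rw [← pvEvs, ih]
    have h1 : ((pvHeadKeys rp.2).map (fun h => (h, true))).count (e, true)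
        = (pvHeadKeys rp.2).count e :=
      List.count_map_of_injective (pvHeadKeys rp.2) (fun h => (h, true))
        (fun a b h => by simpa using h) e
    have h2 : ((pvTailKeys rp.2).map (fun t => (t, false))).count (e, true) = 0 := by
      refine List.count_eq_zero.mpr (fun h => ?_)
      simp only [List.mem_map] at h
      obtain ⟨t, -, ht⟩ := h
      simpa using congrArg Prod.snd ht
    omega

lemma pvTailsCount (s : List (String × List (String × List (String × Int)))) (e : String) :
    ((s.map (fun p => p.2)).flatMap pvTailKeys).count e = (pvEvs s).count (e, false) := by
  induction s with
  | nil => rfl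
  | cons rp s ih =>
    simp only [List.map_cons, List.flatMap_cons, pvEvs, List.count_append]
    rw [← pvEvs, ih]
    have h1 : ((pvTailKeys rp.2).map (fun t => (t, false))).count (e, false)
        = (pvTailKeys rp.2).count e :=
      List.count_map_of_injective (pvTailKeys rp.2) (fun t => (t, false))
        (fun a b h => by simpa using h) e
    have h2 : ((pvHeadKeys rp.2).map (fun h => (h, true))).count (e, false) = 0 := by
      refine List.count_eq_zero.mpr (fun h => ?_)
      simp only [List.mem_map] at h
      obtain ⟨t, -, ht⟩ := h
      simpa using congrArg Prod.snd ht
    omega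

-- B's tally loop is Counter(xs)
lemma pvTally (xs : List String) (e : String) :
    (xs.foldl (fun d h => d.insert h (d.getD h 0 + 1)) PySem.Dict.empty).getD e 0
      = (xs.count e : Int) := by
  have h := PySem.Dict.getD_foldl_modify_add_one xs PySem.Dict.empty e
  simpa [PySem.Dict.modify, PySem.Dict.getD_empty] using h

-- ===== VERDICT (by name: the statement is the Claim_ definition above) =====
theorem reverse_entity_relation_spec : Claim_equal_reverse_entity_relation := by
  intro s _ _
  show List.map (fun p => (p.1, p.2.items))
      ((s.foldl (fun rr rp =>
        let head := pvHeadKeys rp.2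
        let tail := pvTailKeys rp.2
        let rr2 := head.foldl (fun rr h => pvBump rr h "head") rr
        tail.foldl (fun rr t => pvBump rr t "tail") rr2) PySem.Dict.empty).items)
    = List.map (fun e => (e,
        [("head", (List.foldl (fun d h => d.insert h (d.getD h 0 + 1)) PySem.Dict.empty
            ((s.map (fun p => p.2)).flatMap pvHeadKeys)).getD e 0),
         ("tail", (List.foldl (fun d t => d.insert t (d.getD t 0 + 1)) PySem.Dict.empty
            ((s.map (fun p => p.2)).flatMap pvTailKeys)).getD e 0)]))
        (PySem.List.dedup ((s.map (fun p => p.2)).flatMap (fun rel => pvHeadKeys rel ++ pvTailKeys rel)))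
  rw [pvA_flat, pvMain, pvOrder, List.map_map]
  refine List.map_congr_left (fun e _ => ?_)
  simp only [Function.comp_def]
  rw [pvTally, pvTally, pvHeadsCount, pvTailsCount]
  rfl
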